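-- pv_equiv track=rewrite | github.com/Hang14/SPPGAT | utils/tagging_eval.py | extract_entities
-- ===== SOURCE A (Python) =====
-- def extract_entities(labels_lst, start_label = "1_4"):
--     def gen_entities(label_lst, start_label=1, dims=1):
--         # rules -> if end_mark > start_label
--         entities = dict()
--
--         if "_" in start_label:
--             start_label = start_label.split("_")
--             start_label = [int(tmp) for tmp in start_label]
--             ind_func = lambda x: (bool(label in start_label) for label in x)
--             indicator = sum([int(tmp) for tmp in ind_func(label_lst)])
--         else:
--             start_label = int(start_label)
--             indicator = 1 if start_label in labels_lst else 0
--
--         if indicator > 0: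
--             if isinstance(start_label, list):
--                 ixs, _ = zip(*filter(lambda x: x[1] in start_label, enumerate(label_lst)))
--             elif isinstance(start_label, int):
--                 ixs, _ = zip(*filter(lambda x: x[1] == start_label, enumerate(label_lst)))
--             else:
--                 raise ValueError("You Should Notice that The FORMAT of your INPUT")
--
--             ixs = list(ixs)
--             ixs.append(len(label_lst))
--             for i in range(len(ixs) - 1):
--                 sub_label = label_lst[ixs[i]: ixs[i+1]]
--                 end_mark = max(sub_label)
--                 end_ix = ixs[i] + sub_label.index(end_mark) + 1
--                 entities["{}_{}".format(ixs[i], end_ix)] = label_lst[ixs[i]: end_ix]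
--         return entities
--
--
--     if start_label == "1" :
--         entities = gen_entities(labels_lst, start_label = int(start_label))
--     elif start_label == "4":
--         entities = gen_entities(labels_lst, start_label = int(start_label))
--     elif "_" in start_label:
--         entities = gen_entities(labels_lst, start_label = start_label)
--     else:
--         raise ValueError("You Should Check The FOMAT Of your SPLIT NUMBER !!!!!")
--
--     return entities
-- ===== SOURCE B (Python) =====
-- def extract_entities(labels_lst, start_label="1_4"):
--     if "_" not in start_label:
--         raise ValueError("You Should Check The FOMAT Of your SPLIT NUMBER !!!!!")
--     starts = [int(p) for p in start_label.split("_")]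
--     entities = {}
--     seg = None  # (seg_start, running_max, offset_of_first_max)
--     for i, v in enumerate(labels_lst):
--         if v in starts:
--             if seg is not None:
--                 s, _, off = seg
--                 entities["{}_{}".format(s, s + off + 1)] = labels_lst[s:s + off + 1]
--             seg = (i, v, 0)
--         elif seg is not None and v > seg[1]:
--             seg = (seg[0], v, i - seg[0])
--     if seg is not None:
--         s, _, off = seg
--         entities["{}_{}".format(s, s + off + 1)] = labels_lst[s:s + off + 1]
--     return entities
-- ===== Notes on version B (the rewrite author's own statement) =====
-- stated objective: alternative
-- what changed: A counts matches, collects all start-label indices, then slices each segment and rescans it with max() and .index(); B fuses everything into a single left-to-right pass that tracks the current segment's start index, running maximum and first-maximum offset, emitting an entry whenever the next start label (or the end) is reached.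
import Mathlib
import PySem

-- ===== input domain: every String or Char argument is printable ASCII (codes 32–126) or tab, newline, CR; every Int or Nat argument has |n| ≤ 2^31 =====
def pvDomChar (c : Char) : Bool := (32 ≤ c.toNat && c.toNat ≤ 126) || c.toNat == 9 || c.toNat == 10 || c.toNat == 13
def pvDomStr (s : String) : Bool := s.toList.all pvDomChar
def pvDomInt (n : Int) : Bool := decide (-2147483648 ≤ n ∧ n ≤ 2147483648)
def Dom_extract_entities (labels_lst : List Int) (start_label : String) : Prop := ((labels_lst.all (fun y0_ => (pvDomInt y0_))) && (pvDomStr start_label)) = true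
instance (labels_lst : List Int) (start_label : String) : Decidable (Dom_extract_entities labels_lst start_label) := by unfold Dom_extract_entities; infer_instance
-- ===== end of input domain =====

-- B replaces A's multi-pass pipeline (indicator count, start-index collection, per-segment max/.index rescans)
-- with a single left-to-right pass tracking (segment start, running max, first-max offset): a different decomposition, same cost.


-- ===== PORT A =====
def extract_entities (labels_lst : List Int) (start_label : String) : List (String × List Int) :=
  if start_label = "1" then []        -- Python: '"_" in 1' raises TypeError; excluded by Pre_
  else if start_label = "4" then []   -- same TypeError; excluded by Pre_
  else if PySem.Str.isIn "_" start_label then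
    let parts := (PySem.Str.split? start_label "_").getD []
    let starts := parts.map (fun tmp => (PySem.Int.ofStr? tmp).getD 0)   -- none = ValueError; excluded by Pre_
    let indicator := (labels_lst.map (fun label => if label ∈ starts then (1 : Int) else 0)).sum
    if indicator > 0 then
      let ixs := ((PySem.List.enumerate labels_lst 0).filter (fun x => decide (x.2 ∈ starts))).map (·.1)
      let ixs2 := ixs ++ [(labels_lst.length : Int)]
      ((PySem.List.pyRange 0 ((ixs2.length : Int) - 1) 1).foldl (fun entities i =>
        let s := PySem.List.pyGetD ixs2 i 0
        let e := PySem.List.pyGetD ixs2 (i + 1) 0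
        let sub_label := PySem.List.slice labels_lst (some s) (some e)
        let end_mark := (PySem.List.max? sub_label (fun x => x)).getD 0
        let end_ix := s + ((PySem.List.index? sub_label end_mark).getD 0 : Int) + 1
        entities.insert (PySem.Int.toStr s ++ "_" ++ PySem.Int.toStr end_ix)
          (PySem.List.slice labels_lst (some s) (some end_ix)))
        PySem.Dict.empty).items
    else []
  else []   -- Python: explicit ValueError; excluded by Pre_

-- ===== PORT B =====
-- one step of B's single pass: state = (dict so far, current segment as (start, running max, first-max offset))
def pvBStep (labels_lst : List Int) (starts : List Int)
    (acc : PySem.Dict String (List Int) × Option (Int × Int × Int)) (iv : Int × Int) :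
    PySem.Dict String (List Int) × Option (Int × Int × Int) :=
  if iv.2 ∈ starts then
    match acc.2 with
    | none => (acc.1, some (iv.1, iv.2, 0))
    | some (s, _, off) =>
        (acc.1.insert (PySem.Int.toStr s ++ "_" ++ PySem.Int.toStr (s + off + 1))
          (PySem.List.slice labels_lst (some s) (some (s + off + 1))), some (iv.1, iv.2, 0))
  else
    match acc.2 with
    | none => acc
    | some (s, m, _) => if m < iv.2 then (acc.1, some (s, iv.2, iv.1 - s)) else acc

-- B's trailing flush: emit the still-open segment, if any
def pvBFin (labels_lst : List Int)
    (r : PySem.Dict String (List Int) × Option (Int × Int × Int)) : PySem.Dict String (List Int) :=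
  match r.2 with
  | none => r.1
  | some (s, _, off) =>
      r.1.insert (PySem.Int.toStr s ++ "_" ++ PySem.Int.toStr (s + off + 1))
        (PySem.List.slice labels_lst (some s) (some (s + off + 1)))

def extract_entities_alt (labels_lst : List Int) (start_label : String) : List (String × List Int) :=
  if PySem.Str.isIn "_" start_label then
    let starts := ((PySem.Str.split? start_label "_").getD []).map (fun p => (PySem.Int.ofStr? p).getD 0)
    (pvBFin labels_lst
      ((PySem.List.enumerate labels_lst 0).foldl (pvBStep labels_lst starts) (PySem.Dict.empty, none))).items
  else []   -- Python: explicit ValueError; excluded by Pre_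

-- ===== PRECONDITION & SPEC =====
-- Pre_ excludes exactly the inputs where A raises: start_label without "_" (TypeError/ValueError)
-- and "_"-containing start_label with a piece int() cannot parse (ValueError). A returns on everything Pre_ admits.
def Pre_extract_entities (labels_lst : List Int) (start_label : String) : Prop :=
  PySem.Str.isIn "_" start_label = true ∧
  ∀ p ∈ (PySem.Str.split? start_label "_").getD [], (PySem.Int.ofStr? p).isSome = true
instance (labels_lst : List Int) (start_label : String) : Decidable (Pre_extract_entities labels_lst start_label) := by
  unfold Pre_extract_entities; infer_instance

def pvWitness_extract_entities : List Int × String := ([1, 2, 3, 0, 1, 5], "1_4")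

def Spec_extract_entities (labels_lst : List Int) (start_label : String) (out : List (String × List Int)) : Prop := out = extract_entities_alt labels_lst start_label
instance (labels_lst : List Int) (start_label : String) (out : List (String × List Int)) : Decidable (Spec_extract_entities labels_lst start_label out) := by unfold Spec_extract_entities; infer_instance

-- ===== CLAIM (what is proved, stated in full; the proofs are below) =====
def Claim_equal_extract_entities : Prop := ∀ (labels_lst : List Int) (start_label : String), Dom_extract_entities labels_lst start_label → Pre_extract_entities labels_lst start_label → Spec_extract_entities labels_lst start_label (extract_entities labels_lst start_label)

-- ===== LEMMAS AND PROOFS =====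

-- entry emitted for a segment starting at s whose first running maximum sits off positions in: key "s_(s+off+1)", value labels[s:s+off+1]
def pvMk (labels : List Int) (s off : Int) : String × List Int :=
  (PySem.Int.toStr s ++ "_" ++ PySem.Int.toStr (s + off + 1),
   PySem.List.slice labels (some s) (some (s + off + 1)))

-- A's per-segment computation for the segment [s, e)
def pvSeg (labels : List Int) (s e : Int) : String × List Int :=
  let sub := PySem.List.slice labels (some s) (some e)
  let m := (PySem.List.max? sub (fun x => x)).getD 0
  pvMk labels s (((PySem.List.index? sub m).getD 0 : Nat) : Int)

-- the entry list for consecutive start indices (last segment ends at n)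
def pvEntries (labels : List Int) (n : Int) : List Int → List (String × List Int)
  | [] => []
  | [s] => [pvSeg labels s n]
  | s :: s' :: rest => pvSeg labels s s' :: pvEntries labels n (s' :: rest)

-- the stream of entries B's pass emits from a given state
def pvPairs (labels starts : List Int) : List (Int × Int) → Option (Int × Int × Int) → List (String × List Int)
  | [], none => []
  | [], some (s, _, off) => [pvMk labels s off]
  | (i, v) :: rest, none =>
      if v ∈ starts then pvPairs labels starts rest (some (i, v, 0)) else pvPairs labels starts rest none
  | (i, v) :: rest, some (s, m, off) =>
      if v ∈ starts then pvMk labels s off :: pvPairs labels starts rest (some (i, v, 0))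
      else if m < v then pvPairs labels starts rest (some (s, v, i - s))
      else pvPairs labels starts rest (some (s, m, off))

-- B's fold+flush is inserting its emitted stream
lemma pvB_run (labels starts : List Int) :
    ∀ (ev : List (Int × Int)) (st : Option (Int × Int × Int)) (d : PySem.Dict String (List Int)),
    pvBFin labels (ev.foldl (pvBStep labels starts) (d, st))
      = (pvPairs labels starts ev st).foldl (fun d p => d.insert p.1 p.2) d := by
  intro ev
  induction ev with
  | nil =>
    intro st d
    rcases st with _ | ⟨s, m, off⟩ <;> simp [pvBFin, pvPairs, pvMk]
  | cons iv rest ih =>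
    intro st d
    obtain ⟨i, v⟩ := iv
    rcases st with _ | ⟨s, m, off⟩
    · by_cases hv : v ∈ starts <;> simp [pvBStep, pvPairs, hv, ih]
    · by_cases hv : v ∈ starts
      · simp [pvBStep, pvPairs, hv, ih, pvMk]
      · by_cases hm : m < v <;> simp [pvBStep, pvPairs, hv, hm, ih]

-- consecutive-pairs recursion
def pvConsec {β : Type} (G : β → Int → Int → β) : List Int → β → β
  | [], b => b
  | [_], b => b
  | a :: a' :: t, b => pvConsec G (a' :: t) (G b a a')

lemma pvZipFold {β : Type} (G : β → Int → Int → β) :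
    ∀ (ys : List Int) (b : β), (ys.zip ys.tail).foldl (fun d p => G d p.1 p.2) b = pvConsec G ys b := by
  intro ys
  induction ys with
  | nil => intro b; simp [pvConsec]
  | cons a t ih =>
    cases t with
    | nil => intro b; simp [pvConsec]
    | cons a' t' =>
      intro b
      simp only [List.tail_cons, List.zip_cons_cons, List.foldl_cons]
      exact ih (G b a a')

-- A's index loop over ixs2 is the consecutive-pairs recursion
lemma pvRangeFold {β : Type} (G : β → Int → Int → β) (ys : List Int) (b : β) :
    (PySem.List.pyRange 0 ((ys.length : Int) - 1) 1).foldl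
      (fun d i => G d (PySem.List.pyGetD ys i 0) (PySem.List.pyGetD ys (i + 1) 0)) b = pvConsec G ys b := by
  by_cases hys : ys = []
  · subst hys
    simp only [List.length_nil, Nat.cast_zero, zero_sub]
    rw [PySem.List.pyRange_one_eq_nil (by norm_num)]
    simp [pvConsec]
  · have h1 : 1 ≤ ys.length := by cases ys with | nil => simp at hys | cons a t => simp
    have hlen : (ys.length : Int) - 1 = ((ys.zip ys.tail).length : Int) := by
      rw [List.length_zip, List.length_tail]; push_cast; omega
    rw [hlen, ← pvZipFold G ys b,
      ← PySem.List.foldl_pyRange_zero_pyGetD' (ys.zip ys.tail) ((0 : Int), (0 : Int)) (fun d p => G d p.1 p.2) b]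
    apply PySem.List.foldl_congr_mem
    intro acc j hj
    rw [PySem.List.mem_pyRange_one] at hj
    obtain ⟨hj0, hj1⟩ := hj
    obtain ⟨k, rfl⟩ : ∃ k : Nat, j = (k : Int) := ⟨j.toNat, (Int.toNat_of_nonneg hj0).symm⟩
    have hk : k < (ys.zip ys.tail).length := by exact_mod_cast hj1
    have hk' : k < ys.length - 1 := by
      have := hk; rw [List.length_zip, List.length_tail] at this; omega
    have hk1 : k < ys.length := by omega
    have hk2 : k + 1 < ys.length := by omega
    have e1 : PySem.List.pyGetD ys (k : Int) 0 = ys[k] := by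
      rw [PySem.List.pyGetD_natCast, List.getD_eq_getElem ys 0 hk1]
    have e2 : PySem.List.pyGetD ys ((k : Int) + 1) 0 = ys[k + 1] := by
      have : (k : Int) + 1 = ((k + 1 : Nat) : Int) := by push_cast; ring
      rw [this, PySem.List.pyGetD_natCast, List.getD_eq_getElem ys 0 hk2]
    have e3 : PySem.List.pyGetD (ys.zip ys.tail) (k : Int) ((0 : Int), (0 : Int)) = (ys[k], ys[k + 1]) := by
      rw [PySem.List.pyGetD_natCast, List.getD_eq_getElem _ _ hk, List.getElem_zip]
      congr 1
      exact List.getElem_tail _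
    rw [e1, e2, e3]

lemma pvConsec_entries (labels : List Int) (n : Int) :
    ∀ (ixs : List Int) (d : PySem.Dict String (List Int)),
    pvConsec (fun d s e => d.insert (pvSeg labels s e).1 (pvSeg labels s e).2) (ixs ++ [n]) d
      = (pvEntries labels n ixs).foldl (fun d p => d.insert p.1 p.2) d := by
  intro ixs
  induction ixs with
  | nil => intro d; simp [pvConsec, pvEntries]
  | cons s rest ih =>
    cases rest with
    | nil => intro d; simp [pvConsec, pvEntries]
    | cons s' t =>
      intro d
      simp only [List.cons_append, pvConsec, pvEntries, List.foldl_cons]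
      exact ih _

lemma pvMax_append (p : List Int) (m w : Int) (h : PySem.List.max? p (fun x => x) = some m) :
    PySem.List.max? (p ++ [w]) (fun x => x) = some (if m < w then w else m) := by
  cases p with
  | nil => simpa using PySem.List.max?_mem h
  | cons x t =>
    rw [PySem.List.max?_id_cons] at h
    have hm : List.foldl max x t = m := by injection h
    have : (x :: t) ++ [w] = x :: (t ++ [w]) := by simp
    rw [this, PySem.List.max?_id_cons, List.foldl_append]
    simp only [List.foldl_cons, List.foldl_nil, hm]
    congr 1
    rcases lt_or_ge m w with h' | h' <;> simp [max_def] <;> omega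

-- processing a run of non-start values only updates (max, first-max offset), preserving the invariant
lemma pvSegStep (labels starts : List Int) :
    ∀ (vals : List Int) (rest : List (Int × Int)) (s : Nat) (p : List Int) (m : Int) (k : Nat),
    (∀ v ∈ vals, v ∉ starts) →
    PySem.List.max? p (fun x => x) = some m →
    PySem.List.index? p m = some k →
    ∃ (M : Int) (K : Nat),
      pvPairs labels starts (PySem.List.enumerate vals ((s : Int) + (p.length : Int)) ++ rest) (some ((s : Int), m, (k : Int)))
        = pvPairs labels starts rest (some ((s : Int), M, (K : Int)))
      ∧ PySem.List.max? (p ++ vals) (fun x => x) = some M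
      ∧ PySem.List.index? (p ++ vals) M = some K := by
  intro vals
  induction vals with
  | nil =>
    intro rest s p m k hvals hmax hidx
    exact ⟨m, k, by simp [PySem.List.enumerate_nil], by simpa using hmax, by simpa using hidx⟩
  | cons w vals ih =>
    intro rest s p m k hvals hmax hidx
    rw [PySem.List.enumerate_cons]
    have hw : w ∉ starts := hvals w (by simp)
    simp only [List.cons_append, pvPairs]
    rw [if_neg hw]
    have e1 : (s : Int) + (p.length : Int) + 1 = (s : Int) + (((p ++ [w]).length : Nat) : Int) := by
      simp
      ring
    by_cases hlt : m < w
    · have hnot : w ∉ p := fun hmem => absurd (PySem.List.max?_isMax hmax w hmem) (by omega)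
      have hmax' : PySem.List.max? (p ++ [w]) (fun x => x) = some w := by
        rw [pvMax_append p m w hmax, if_pos hlt]
      have hidx' : PySem.List.index? (p ++ [w]) w = some p.length :=
        PySem.List.index?_append_singleton_self p w hnot
      rw [if_pos hlt]
      have e2 : (s : Int) + (p.length : Int) - (s : Int) = ((p.length : Nat) : Int) := by ring
      rw [e2, e1]
      obtain ⟨M, K, h1, h2, h3⟩ := ih rest s (p ++ [w]) w p.length
        (fun v hv => hvals v (by simp [hv])) hmax' hidx'
      exact ⟨M, K, h1, by simpa [List.append_assoc] using h2, by simpa [List.append_assoc] using h3⟩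
    · have hmax' : PySem.List.max? (p ++ [w]) (fun x => x) = some m := by
        rw [pvMax_append p m w hmax, if_neg hlt]
      have hidx' : PySem.List.index? (p ++ [w]) m = some k := by
        rw [PySem.List.index?_append_of_mem [w] (PySem.List.max?_mem hmax), hidx]
      rw [if_neg hlt, e1]
      obtain ⟨M, K, h1, h2, h3⟩ := ih rest s (p ++ [w]) m k
        (fun v hv => hvals v (by simp [hv])) hmax' hidx'
      exact ⟨M, K, h1, by simpa [List.append_assoc] using h2, by simpa [List.append_assoc] using h3⟩

-- non-start values before the first start are skipped
lemma pvSkip (labels starts : List Int) :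
    ∀ (vals : List Int) (rest : List (Int × Int)) (pos : Int), (∀ v ∈ vals, v ∉ starts) →
    pvPairs labels starts (PySem.List.enumerate vals pos ++ rest) none = pvPairs labels starts rest none := by
  intro vals
  induction vals with
  | nil => intro rest pos h; simp [PySem.List.enumerate_nil]
  | cons w vals ih =>
    intro rest pos h
    rw [PySem.List.enumerate_cons]
    simp only [List.cons_append, pvPairs]
    rw [if_neg (h w (by simp))]
    exact ih rest (pos + 1) (fun v hv => h v (by simp [hv]))

-- A's per-segment entry equals B's emitted entry once max/first-max-index agree
lemma pvSegEq (labels : List Int) (s eN : Nat) (P : List Int) (M : Int) (K : Nat)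
    (hsub : PySem.List.slice labels (some (s : Int)) (some (eN : Int)) = P)
    (hmax : PySem.List.max? P (fun x => x) = some M)
    (hidx : PySem.List.index? P M = some K) :
    pvSeg labels (s : Int) (eN : Int) = pvMk labels (s : Int) (K : Int) := by
  have hidx2 : List.idxOf? M P = some K := by
    rw [← PySem.List.index?_eq_idxOf?]; exact hidx
  simp [pvSeg, hsub, hmax, hidx2]

lemma pvDropHead {q : Int → Bool} {l : List Int} {w : Int} {t : List Int}
    (h : l.dropWhile q = w :: t) : q w = false := by
  induction l with
  | nil => simp at h
  | cons a t' ih =>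
    rw [List.dropWhile_cons] at h
    by_cases ha : q a = true
    · exact ih (by simpa [ha] using h)
    · rw [if_neg ha] at h
      injection h with h1 h2
      subst h1
      simpa using ha

-- main invariant: B's stream from an open segment = A's entries for start indices s :: (starts in the remainder)
lemma pvSomeAux (labels starts : List Int) :
    ∀ (N : Nat) (l : List Int), l.length ≤ N → ∀ (pos s : Nat) (p : List Int) (m : Int) (k : Nat),
    labels.drop pos = l → labels.drop s = p ++ l → pos = s + p.length → p ≠ [] →
    PySem.List.max? p (fun x => x) = some m → PySem.List.index? p m = some k →
    pvPairs labels starts (PySem.List.enumerate l (pos : Int)) (some ((s : Int), m, (k : Int)))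
      = pvEntries labels (labels.length : Int)
          ((s : Int) :: ((PySem.List.enumerate l (pos : Int)).filter (fun x => decide (x.2 ∈ starts))).map (·.1)) := by
  intro N
  induction N with
  | zero =>
    intro l hl pos s p m k hdrop hdrops hpos hpne hmax hidx
    have hl0 : l = [] := List.eq_nil_of_length_eq_zero (Nat.le_zero.mp hl)
    subst hl0
    rw [PySem.List.enumerate_nil]
    simp only [pvPairs, List.filter_nil, List.map_nil, pvEntries]
    have hsub : PySem.List.slice labels (some (s : Int)) (some ((labels.length : Nat) : Int)) = p := by
      rw [PySem.List.slice_natCast, List.take_of_length_le (by rw [List.length_drop])]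
      simpa using hdrops
    rw [pvSegEq labels s labels.length p m k hsub hmax hidx]
  | succ N ih =>
    intro l hl pos s p m k hdrop hdrops hpos hpne hmax hidx
    set q : Int → Bool := fun v => !decide (v ∈ starts) with hq
    have hsplit : l.takeWhile q ++ l.dropWhile q = l := List.takeWhile_append_dropWhile
    set tw : List Int := l.takeWhile q with htw
    have hvals : ∀ v ∈ tw, v ∉ starts := by
      intro v hv
      have := List.mem_takeWhile_imp (htw ▸ hv)
      simpa [hq] using this
    have hposI : (pos : Int) = (s : Int) + (p.length : Int) := by rw [hpos]; push_cast; ring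
    have henum : PySem.List.enumerate l (pos : Int)
        = PySem.List.enumerate tw ((s : Int) + (p.length : Int))
          ++ PySem.List.enumerate (l.dropWhile q) (((s : Int) + (p.length : Int)) + (tw.length : Int)) := by
      rw [← hposI]
      conv_lhs => rw [← hsplit]
      exact PySem.List.enumerate_append _ _ _
    obtain ⟨M, K, hstep, hmax', hidx'⟩ :=
      pvSegStep labels starts tw
        (PySem.List.enumerate (l.dropWhile q) (((s : Int) + (p.length : Int)) + (tw.length : Int)))
        s p m k hvals hmax hidx
    rw [henum, hstep, List.filter_append]
    have hfilnil : (PySem.List.enumerate tw ((s : Int) + (p.length : Int))).filter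
        (fun x => decide (x.2 ∈ starts)) = [] := by
      rw [List.filter_eq_nil_iff]
      intro x hx
      rw [PySem.List.mem_enumerate_iff] at hx
      obtain ⟨j, hj, rfl⟩ := hx
      simp [hvals _ (List.getElem_mem hj)]
    rw [hfilnil, List.nil_append]
    cases hrest : l.dropWhile q with
    | nil =>
      simp only [PySem.List.enumerate_nil, List.filter_nil, List.map_nil, pvPairs, pvEntries]
      have hlv : l = tw := by
        conv_lhs => rw [← hsplit]
        rw [hrest, List.append_nil]
      have hsub : PySem.List.slice labels (some (s : Int)) (some ((labels.length : Nat) : Int))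
          = p ++ tw := by
        rw [PySem.List.slice_natCast, List.take_of_length_le (by rw [List.length_drop])]
        rw [hdrops, ← hlv]
      rw [pvSegEq labels s labels.length (p ++ tw) M K hsub hmax' hidx']
    | cons w l₃ =>
      have hw : w ∈ starts := by simpa [hq] using pvDropHead hrest
      have hl_eq : l = tw ++ (w :: l₃) := by
        conv_lhs => rw [← hsplit]
        rw [hrest]
      set e : Nat := pos + tw.length with he
      have hPOS2 : ((s : Int) + (p.length : Int)) + (tw.length : Int) = ((e : Nat) : Int) := by
        rw [he, hpos]; push_cast; ring
      have hdrop_e : labels.drop e = w :: l₃ := by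
        rw [he, ← List.drop_drop, hdrop]
        calc List.drop tw.length l = List.drop tw.length (tw ++ (w :: l₃)) := by rw [← hl_eq]
          _ = w :: l₃ := List.drop_left
      have hdrop_e1 : labels.drop (e + 1) = l₃ := by
        rw [← List.drop_drop, hdrop_e]
        rfl
      have hl3 : l₃.length ≤ N := by
        have h' : l.length = tw.length + (w :: l₃).length := by rw [hl_eq, List.length_append]
        simp at h'
        omega
      have ih_app := ih l₃ hl3 (e + 1) e [w] w 0 hdrop_e1
        (by rw [hdrop_e]; rfl) (by simp) (by simp)
        (by rw [PySem.List.max?_id_cons]; rfl) (PySem.List.index?_cons_self w [])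
      push_cast at ih_app
      rw [hPOS2, PySem.List.enumerate_cons]
      simp only [pvPairs]
      rw [if_pos hw]
      rw [ih_app]
      have hsub : PySem.List.slice labels (some (s : Int)) (some ((e : Nat) : Int)) = p ++ tw := by
        rw [PySem.List.slice_natCast]
        have he2 : e - s = (p ++ tw).length := by rw [List.length_append]; omega
        rw [he2, hdrops, hl_eq,
          show p ++ (tw ++ (w :: l₃)) = (p ++ tw) ++ (w :: l₃) from (List.append_assoc _ _ _).symm]
        exact List.take_left
      conv_rhs => rw [List.filter_cons_of_pos (by simp [hw]), List.map_cons, pvEntries]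
      rw [pvSegEq labels s e (p ++ tw) M K hsub hmax' hidx']

lemma pvSome (labels starts : List Int)
    (l : List Int) (pos s : Nat) (p : List Int) (m : Int) (k : Nat)
    (h1 : labels.drop pos = l) (h2 : labels.drop s = p ++ l) (h3 : pos = s + p.length) (h4 : p ≠ [])
    (h5 : PySem.List.max? p (fun x => x) = some m) (h6 : PySem.List.index? p m = some k) :
    pvPairs labels starts (PySem.List.enumerate l (pos : Int)) (some ((s : Int), m, (k : Int)))
      = pvEntries labels (labels.length : Int)
          ((s : Int) :: ((PySem.List.enumerate l (pos : Int)).filter (fun x => decide (x.2 ∈ starts))).map (·.1)) :=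
  pvSomeAux labels starts l.length l le_rfl pos s p m k h1 h2 h3 h4 h5 h6

lemma pvNone (labels starts : List Int) (l : List Int) (pos : Nat) (hl : labels.drop pos = l) :
    pvPairs labels starts (PySem.List.enumerate l (pos : Int)) none
      = pvEntries labels (labels.length : Int)
          (((PySem.List.enumerate l (pos : Int)).filter (fun x => decide (x.2 ∈ starts))).map (·.1)) := by
  set q : Int → Bool := fun v => !decide (v ∈ starts) with hq
  have hsplit : l.takeWhile q ++ l.dropWhile q = l := List.takeWhile_append_dropWhile
  set tw : List Int := l.takeWhile q with htw
  have hvals : ∀ v ∈ tw, v ∉ starts := by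
    intro v hv
    have := List.mem_takeWhile_imp (htw ▸ hv)
    simpa [hq] using this
  have henum : PySem.List.enumerate l (pos : Int)
      = PySem.List.enumerate tw (pos : Int)
        ++ PySem.List.enumerate (l.dropWhile q) ((pos : Int) + (tw.length : Int)) := by
    conv_lhs => rw [← hsplit]
    exact PySem.List.enumerate_append _ _ _
  rw [henum, pvSkip labels starts tw _ _ hvals, List.filter_append]
  have hfilnil : (PySem.List.enumerate tw (pos : Int)).filter
      (fun x => decide (x.2 ∈ starts)) = [] := by
    rw [List.filter_eq_nil_iff]
    intro x hx
    rw [PySem.List.mem_enumerate_iff] at hx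
    obtain ⟨j, hj, rfl⟩ := hx
    simp [hvals _ (List.getElem_mem hj)]
  rw [hfilnil, List.nil_append]
  cases hrest : l.dropWhile q with
  | nil =>
    simp [PySem.List.enumerate_nil, pvPairs, pvEntries]
  | cons w l₃ =>
    have hw : w ∈ starts := by simpa [hq] using pvDropHead hrest
    have hl_eq : l = tw ++ (w :: l₃) := by
      conv_lhs => rw [← hsplit]
      rw [hrest]
    set e : Nat := pos + tw.length with he
    have hPOS2 : (pos : Int) + (tw.length : Int) = ((e : Nat) : Int) := by
      rw [he]; push_cast; ring
    have hdrop_e : labels.drop e = w :: l₃ := by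
      rw [he, ← List.drop_drop, hl]
      calc List.drop tw.length l = List.drop tw.length (tw ++ (w :: l₃)) := by rw [← hl_eq]
        _ = w :: l₃ := List.drop_left
    have hdrop_e1 : labels.drop (e + 1) = l₃ := by
      rw [← List.drop_drop, hdrop_e]
      rfl
    have hrec := pvSome labels starts l₃ (e + 1) e [w] w 0 hdrop_e1
      (by rw [hdrop_e]; rfl) (by simp) (by simp)
      (by rw [PySem.List.max?_id_cons]; rfl) (PySem.List.index?_cons_self w [])
    push_cast at hrec
    rw [hPOS2, PySem.List.enumerate_cons]
    simp only [pvPairs]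
    rw [if_pos hw]
    rw [hrec]
    conv_rhs => rw [List.filter_cons_of_pos (by simp [hw]), List.map_cons]


-- ===== VERDICT (by name: the statement is the Claim_ definition above) =====
theorem extract_entities_spec : Claim_equal_extract_entities := by
  intro labels sl hdom hpre
  obtain ⟨hin, hparse⟩ := hpre
  simp only [Spec_extract_entities, extract_entities, extract_entities_alt]
  have h1 : sl ≠ "1" := by rintro rfl; exact absurd hin (by decide)
  have h4 : sl ≠ "4" := by rintro rfl; exact absurd hin (by decide)
  rw [if_neg h1, if_neg h4, if_pos hin, if_pos hin]
  set starts : List Int := ((PySem.Str.split? sl "_").getD []).map (fun p => (PySem.Int.ofStr? p).getD 0)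
    with hstarts
  have hB := pvB_run labels starts (PySem.List.enumerate labels 0) none PySem.Dict.empty
  have hN := pvNone labels starts labels 0 (by simp)
  push_cast at hN
  rw [hN] at hB
  rw [hB]
  by_cases hind : (List.map (fun label => if label ∈ starts then (1 : Int) else 0) labels).sum > 0
  · rw [if_pos hind]
    have hA := pvRangeFold (β := PySem.Dict String (List Int))
      (fun d s e => d.insert (pvSeg labels s e).1 (pvSeg labels s e).2)
      (((PySem.List.enumerate labels 0).filter (fun x => decide (x.2 ∈ starts))).map (·.1)
        ++ [(labels.length : Int)])
      PySem.Dict.empty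
    rw [pvConsec_entries labels ((labels.length : Int))
      (((PySem.List.enumerate labels 0).filter (fun x => decide (x.2 ∈ starts))).map (·.1))
      PySem.Dict.empty] at hA
    exact congrArg PySem.Dict.items hA
  · rw [if_neg hind]
    have hnil : (PySem.List.enumerate labels 0).filter (fun x => decide (x.2 ∈ starts)) = [] := by
      rw [List.filter_eq_nil_iff]
      intro x hx
      rw [PySem.List.mem_enumerate_iff] at hx
      obtain ⟨kk, hkk, rfl⟩ := hx
      intro hmem
      apply hind
      have hrw : (List.map (fun label => if label ∈ starts then (1 : Int) else 0) labels)
          = labels.map (fun label => if (decide (label ∈ starts)) = true then 1 else 0) := by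
        simp
      rw [hrw, PySem.List.sum_map_ite_one_zero]
      have hc : 0 < labels.countP (fun label => decide (label ∈ starts)) := by
        rw [List.countP_pos_iff]
        exact ⟨labels[kk], List.getElem_mem hkk, by simpa using hmem⟩
      exact_mod_cast hc
    rw [hnil]
    simp [pvEntries]
    rfl
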